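-- pv_equiv track=rewrite | github.com/1712121048/LeetCode-TakeNotes | 六月刷题/3067. 在带权树网络中统计可连接服务器对数目.py | count_pair_permutations
-- ===== SOURCE A (Python) =====
-- def count_pair_permutations(nums):
--     total_permutations = 0
--     n = len(nums)
--
--     # 双重循环遍历所有元素对
--     for i in range(n):
--         for j in range(n):
--             if i != j:
--                 total_permutations += 1
--
--     return total_permutations
-- ===== SOURCE B (Python) =====
-- def count_pair_permutations(nums):
--     n = len(nums)
--     return n * (n - 1)
-- ===== Notes on version B (the rewrite author's own statement) =====
-- stated objective: faster
-- what changed: Replaced the O(n^2) double loop counting ordered pairs (i,j), i!=j, by the closed form n*(n-1).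
import Mathlib
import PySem

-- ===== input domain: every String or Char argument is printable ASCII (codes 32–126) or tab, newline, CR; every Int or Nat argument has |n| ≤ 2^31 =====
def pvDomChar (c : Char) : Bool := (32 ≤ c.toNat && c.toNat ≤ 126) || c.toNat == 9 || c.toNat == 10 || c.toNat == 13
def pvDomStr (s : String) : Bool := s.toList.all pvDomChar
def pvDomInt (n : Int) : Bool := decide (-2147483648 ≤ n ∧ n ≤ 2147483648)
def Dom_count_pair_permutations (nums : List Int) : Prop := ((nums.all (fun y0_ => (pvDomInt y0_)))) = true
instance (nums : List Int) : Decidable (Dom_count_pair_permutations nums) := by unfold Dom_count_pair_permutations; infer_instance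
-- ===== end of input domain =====

-- B replaces A's O(n^2) double counting loop by the closed form n*(n-1).

-- ===== PORT A =====
def count_pair_permutations (nums : List Int) : Int :=
  let n : Int := nums.length
  (PySem.List.pyRange 0 n 1).foldl
    (fun acc i =>
      (PySem.List.pyRange 0 n 1).foldl
        (fun acc2 j => if i ≠ j then acc2 + 1 else acc2) acc)
    0

-- ===== PORT B =====
def count_pair_permutations_alt (nums : List Int) : Int :=
  let n : Int := nums.length
  n * (n - 1)

-- ===== PRECONDITION & SPEC =====
def Spec_count_pair_permutations (nums : List Int) (out : Int) : Prop := out = count_pair_permutations_alt nums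
instance (nums : List Int) (out : Int) : Decidable (Spec_count_pair_permutations nums out) := by unfold Spec_count_pair_permutations; infer_instance

-- ===== CLAIM (what is proved, stated in full; the proofs are below) =====
def Claim_equal_count_pair_permutations : Prop := ∀ (nums : List Int), Dom_count_pair_permutations nums → Spec_count_pair_permutations nums (count_pair_permutations nums)

-- ===== LEMMAS AND PROOFS =====

-- the inner loop over the full range adds (length - 1) for each i in the range
theorem pv_countP_ne (n : Int) (i : Int) (hi : i ∈ PySem.List.pyRange 0 n 1) :
    ((PySem.List.pyRange 0 n 1).countP (fun j => decide (i ≠ j)) : Int)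
      = (PySem.List.pyRange 0 n 1).length - 1 := by
  have hnd : (PySem.List.pyRange 0 n 1).Nodup := PySem.List.nodup_pyRange_one 0 n
  have hcount : (PySem.List.pyRange 0 n 1).count i = 1 :=
    List.count_eq_one_of_mem hnd hi
  have hsplit := List.length_eq_countP_add_countP (l := PySem.List.pyRange 0 n 1)
    (p := fun j => decide (i ≠ j))
  have hnot : (PySem.List.pyRange 0 n 1).countP (fun a => ¬(fun j => decide (i ≠ j)) a)
      = (PySem.List.pyRange 0 n 1).count i := by
    unfold List.count
    apply List.countP_congr
    intro x _
    simp only [decide_not, Bool.decide_coe, Bool.not_not]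
    simp only [decide_eq_true_eq, beq_iff_eq]
    exact eq_comm
  rw [hnot, hcount] at hsplit
  omega

theorem count_pair_permutations_eq (nums : List Int) :
    count_pair_permutations nums = count_pair_permutations_alt nums := by
  unfold count_pair_permutations count_pair_permutations_alt
  set n : Int := (nums.length : Int) with hn
  set l := PySem.List.pyRange 0 n 1 with hl
  have hstep : l.foldl
      (fun acc i => l.foldl (fun acc2 j => if i ≠ j then acc2 + 1 else acc2) acc) 0
      = l.foldl (fun acc i => acc + ((l.length : Int) - 1)) 0 := by
    apply PySem.List.foldl_congr_mem
    intro acc i hi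
    rw [PySem.List.foldl_ite_add_one]
    rw [pv_countP_ne n i (hl ▸ hi)]
  rw [hstep, PySem.List.foldl_add]
  have hmap : (l.map fun _ => (l.length : Int) - 1).sum
      = (l.length : Int) * ((l.length : Int) - 1) := by
    rw [List.map_const']
    simp [List.sum_replicate]
  simp only [hmap]
  have hlen : (l.length : Int) = n := by
    rw [hl, PySem.List.length_pyRange_one]
    simp [hn]
  rw [hlen]
  ring

-- ===== VERDICT (by name: the statement is the Claim_ definition above) =====
theorem count_pair_permutations_spec : Claim_equal_count_pair_permutations := by
  intro nums _
  exact count_pair_permutations_eq nums
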